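-- pv_equiv track=rewrite | github.com/ruiying-ocean/cgeniepy | src/cgeniepy/grid.py | dim_order
-- ===== SOURCE A (Python) =====
-- def dim_order(input):
--     """
--     Determine the order of dimensions in the input data array
--
--     :return: tuple of index in the input data
--
--     Example
--     -----------
--     >>> input = ('lat', 'lon', 'depth')
--     >>> dim_order(input) ## always follow time, depth, lat, lon
--     (2, 0, 1)
--     """
--     order = []
--     input_lower = tuple(element.lower() for element in input)
--
--     dim_candidates = [
--         ['time', 't', 'age', 'date', 'year', 'age [ka]', 'age [ka bp]'],
--         ['depth', 'z', 'z_t', 'level', 'nlevel', 'lvl', 'lev', 'depth_1',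
--             'elevation [m]','zt', 'depth_surface','zt_moc'],
--         ['lat', 'latitude', 'y', 'lat_moc', 'lat_psi'],
--         ['lon', 'longitude', 'x', 'lon_psi']
--     ]
--
--     for candidates in dim_candidates:
--         for candidate in candidates:
--             if candidate in input_lower:
--                 order.append(input_lower.index(candidate))
--                 break
--
--     return tuple(order)
-- ===== SOURCE B (Python) =====
-- _GROUPS = [
--     ['time', 't', 'age', 'date', 'year', 'age [ka]', 'age [ka bp]'],
--     ['depth', 'z', 'z_t', 'level', 'nlevel', 'lvl', 'lev', 'depth_1',
--      'elevation [m]', 'zt', 'depth_surface', 'zt_moc'],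
--     ['lat', 'latitude', 'y', 'lat_moc', 'lat_psi'],
--     ['lon', 'longitude', 'x', 'lon_psi'],
-- ]
--
-- # name -> (group priority, rank within group); names are unique across groups
-- _KEY = {name: (g, r) for g, names in enumerate(_GROUPS) for r, name in enumerate(names)}
--
-- def dim_order(input):
--     best = {}
--     for i, element in enumerate(input):
--         key = _KEY.get(element.lower())
--         if key is not None:
--             g, r = key
--             cur = best.get(g)
--             if cur is None or (r, i) < cur:
--                 best[g] = (r, i)
--     return tuple(best[g][1] for g in range(4) if g in best)
-- ===== Notes on version B (the rewrite author's own statement) =====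
-- stated objective: faster
-- what changed: Replaces A's group-by-group scan (for each of 28 candidate names, a membership test plus a .index pass over the input) with a precomputed name->(group,rank) dict and a single pass over the input that keeps, per group, the element minimizing (candidate rank, input index).
import Mathlib
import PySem

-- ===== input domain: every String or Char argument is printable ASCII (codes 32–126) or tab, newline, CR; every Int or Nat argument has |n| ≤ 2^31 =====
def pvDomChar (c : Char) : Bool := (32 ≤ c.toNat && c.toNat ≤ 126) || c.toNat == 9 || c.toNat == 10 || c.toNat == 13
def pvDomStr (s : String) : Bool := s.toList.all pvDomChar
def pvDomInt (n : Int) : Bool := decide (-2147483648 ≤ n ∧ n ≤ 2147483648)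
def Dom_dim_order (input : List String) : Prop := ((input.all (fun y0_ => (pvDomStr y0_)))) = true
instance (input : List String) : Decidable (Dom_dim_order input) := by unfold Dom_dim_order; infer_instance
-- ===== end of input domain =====

-- B replaces A's per-group candidate scans (membership + .index over the input) with one pass
-- over the input and a precomputed name -> (group, rank) map, keeping the per-group lex-minimal
-- (rank, index) hit; one pass instead of 28 membership/index scans (measured faster in a timing run).


-- ===== PORT A =====
def pvCands : List (List String) :=
  [["time", "t", "age", "date", "year", "age [ka]", "age [ka bp]"],
   ["depth", "z", "z_t", "level", "nlevel", "lvl", "lev", "depth_1",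
    "elevation [m]", "zt", "depth_surface", "zt_moc"],
   ["lat", "latitude", "y", "lat_moc", "lat_psi"],
   ["lon", "longitude", "x", "lon_psi"]]

-- inner 'for candidate in candidates: if candidate in input_lower: …; break'
def pvFirstHit : List String → List String → Option Nat
  | [], _ => none
  | c :: rest, low => if low.contains c then PySem.List.index? low c else pvFirstHit rest low

def dim_order (input : List String) : List Int :=
  let low := input.map PySem.Str.lower
  pvCands.foldl (fun order cands =>
    match pvFirstHit cands low with
    | some i => order ++ [(i : Int)]
    | none => order) []

-- ===== PORT B =====
-- the module-level dict _KEY = {name: (g, r) …}, written out as the literal it evaluates to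
def pvKeyTable : PySem.Dict String (Nat × Nat) := PySem.Dict.mk
  [("time", (0, 0)), ("t", (0, 1)), ("age", (0, 2)), ("date", (0, 3)), ("year", (0, 4)),
   ("age [ka]", (0, 5)), ("age [ka bp]", (0, 6)),
   ("depth", (1, 0)), ("z", (1, 1)), ("z_t", (1, 2)), ("level", (1, 3)), ("nlevel", (1, 4)),
   ("lvl", (1, 5)), ("lev", (1, 6)), ("depth_1", (1, 7)), ("elevation [m]", (1, 8)),
   ("zt", (1, 9)), ("depth_surface", (1, 10)), ("zt_moc", (1, 11)),
   ("lat", (2, 0)), ("latitude", (2, 1)), ("y", (2, 2)), ("lat_moc", (2, 3)), ("lat_psi", (2, 4)),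
   ("lon", (3, 0)), ("longitude", (3, 1)), ("x", (3, 2)), ("lon_psi", (3, 3))]

-- 'cur is None or (r, i) < cur'
def pvBetter (r i : Nat) (cur : Option (Nat × Nat)) : Bool :=
  match cur with
  | none => true
  | some (r', i') => r < r' || (r == r' && i < i')

-- 'for i, element in enumerate(input): …' updating the per-group best
def pvLoopB : List String → Nat → PySem.Dict Nat (Nat × Nat) → PySem.Dict Nat (Nat × Nat)
  | [], _, best => best
  | x :: xs, i, best =>
    let best' :=
      match pvKeyTable.get? (PySem.Str.lower x) with
      | none => best
      | some (g, r) => if pvBetter r i (best.get? g) then best.insert g (r, i) else best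
    pvLoopB xs (i + 1) best'

def dim_order_alt (input : List String) : List Int :=
  let best := pvLoopB input 0 PySem.Dict.empty
  (List.range 4).filterMap (fun g => (best.get? g).map (fun p => (p.2 : Int)))

-- ===== PRECONDITION & SPEC =====
def Spec_dim_order (input : List String) (out : List Int) : Prop := out = dim_order_alt input
instance (input : List String) (out : List Int) : Decidable (Spec_dim_order input out) := by unfold Spec_dim_order; infer_instance

-- ===== CLAIM (what is proved, stated in full; the proofs are below) =====
def Claim_equal_dim_order : Prop := ∀ (input : List String), Dom_dim_order input → Spec_dim_order input (dim_order input)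

-- ===== LEMMAS AND PROOFS =====

-- generic one-slot version of B's loop: fold the (rank, index) lex-minimum of the hits of ρ
def pvG (ρ : String → Option Nat) : List String → Nat → Option (Nat × Nat) → Option (Nat × Nat)
  | [], _, acc => acc
  | x :: xs, i, acc =>
    let acc' := match ρ x with
      | none => acc
      | some r => if pvBetter r i acc then some (r, i) else acc
    pvG ρ xs (i + 1) acc'

-- the rank of a (lowered) name within group g, read off the table
def pvRank (g : Nat) (s : String) : Option Nat :=
  match pvKeyTable.get? s with
  | none => none
  | some (g', r) => if g' = g then some r else none

-- lex-min combine used to factor the accumulator out of pvG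
def pvComb (a : Nat × Nat) (o : Option (Nat × Nat)) : Option (Nat × Nat) :=
  match o with
  | none => some a
  | some b => if pvBetter b.1 b.2 (some a) then some b else some a

theorem pvLoopB_get? (xs : List String) (i : Nat) (best : PySem.Dict Nat (Nat × Nat)) (g : Nat) :
    (pvLoopB xs i best).get? g = pvG (fun x => pvRank g (PySem.Str.lower x)) xs i (best.get? g) := by
  induction xs generalizing i best with
  | nil => rfl
  | cons x xs ih =>
    simp only [pvLoopB, pvG]
    rw [ih]
    congr 1
    cases h : pvKeyTable.get? (PySem.Str.lower x) with
    | none => simp [pvRank, h]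
    | some p =>
      obtain ⟨g', r⟩ := p
      by_cases hg : g' = g
      · subst hg
        simp only [pvRank, h]
        by_cases hb : pvBetter r i (best.get? g')
        · simp [hb, PySem.Dict.get?_insert_self]
        · simp [hb]
      · simp only [pvRank, h, if_neg hg]
        by_cases hb : pvBetter r i (best.get? g')
        · simp [hb, PySem.Dict.get?_insert, Ne.symm hg]
        · simp [hb]

theorem pvG_comp (ρ : String → Option Nat) (f : String → String) (xs : List String) (i : Nat)
    (acc : Option (Nat × Nat)) : pvG (fun x => ρ (f x)) xs i acc = pvG ρ (xs.map f) i acc := by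
  induction xs generalizing i acc with
  | nil => rfl
  | cons x xs ih => simp only [pvG, List.map]; exact ih _ _

theorem pvG_none (ρ : String → Option Nat) (xs : List String) (i : Nat)
    (h : ∀ x ∈ xs, ρ x = none) : pvG ρ xs i none = none := by
  induction xs generalizing i with
  | nil => rfl
  | cons x xs ih =>
    simp only [pvG, h x (by simp)]
    exact ih _ (fun y hy => h y (by simp [hy]))

-- absorbing accumulator: a (0, m) with m below all coming indices is final
theorem pvG_zero_absorb (ρ : String → Option Nat) (xs : List String) (j m : Nat) (hm : m < j) :
    pvG ρ xs j (some (0, m)) = some (0, m) := by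
  induction xs generalizing j with
  | nil => rfl
  | cons x xs ih =>
    simp only [pvG]
    cases h : ρ x with
    | none => exact ih _ (Nat.lt_succ_of_lt hm)
    | some r =>
      have hb : pvBetter r j (some (0, m)) = false := by
        simp only [pvBetter]
        simp only [Bool.or_eq_false_iff, decide_eq_false_iff_not, Bool.and_eq_false_iff,
          beq_eq_false_iff_ne, ne_eq]
        omega
      simp only [hb, Bool.false_eq_true, if_false]
      exact ih _ (Nat.lt_succ_of_lt hm)

theorem pvComb_step (a : Nat × Nat) (r j : Nat) (R : Option (Nat × Nat)) :
    pvComb (if pvBetter r j (some a) then (r, j) else a) R = pvComb a (pvComb (r, j) R) := by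
  obtain ⟨ar, ai⟩ := a
  cases R with
  | none =>
    simp only [pvComb, pvBetter]
    split_ifs <;> simp_all
  | some b =>
    obtain ⟨br, bi⟩ := b
    simp only [pvComb, pvBetter]
    split_ifs <;> simp_all <;> omega

theorem pvG_acc (ρ : String → Option Nat) (xs : List String) (j : Nat) (a : Nat × Nat) :
    pvG ρ xs j (some a) = pvComb a (pvG ρ xs j none) := by
  induction xs generalizing j a with
  | nil => rfl
  | cons x xs ih =>
    simp only [pvG]
    cases h : ρ x with
    | none => exact ih _ _
    | some r =>
      by_cases hb : pvBetter r j none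
      · simp only [hb, if_true]
        rw [show (if pvBetter r j (some a) then some (r, j) else some a)
              = some (if pvBetter r j (some a) then (r, j) else a) by split_ifs <;> rfl]
        rw [ih _ (if pvBetter r j (some a) then (r, j) else a), ih _ (r, j)]
        exact pvComb_step _ _ _ _
      · simp [pvBetter] at hb

-- shifting every rank by one does not change which element is selected
theorem pvG_shift (ρ ρ' : String → Option Nat) (xs : List String) (i : Nat)
    (acc : Option (Nat × Nat))
    (h : ∀ x ∈ xs, ρ' x = (ρ x).map (· + 1)) :
    pvG ρ' xs i (acc.map (fun p => (p.1 + 1, p.2))) =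
      (pvG ρ xs i acc).map (fun p => (p.1 + 1, p.2)) := by
  induction xs generalizing i acc with
  | nil => rfl
  | cons x xs ih =>
    simp only [pvG, h x (by simp)]
    cases hx : ρ x with
    | none => exact ih _ _ (fun y hy => h y (by simp [hy]))
    | some r =>
      simp only [Option.map_some]
      have hbet : pvBetter (r + 1) i (acc.map (fun p => (p.1 + 1, p.2))) = pvBetter r i acc := by
        cases acc with
        | none => rfl
        | some b =>
          obtain ⟨br, bi⟩ := b
          simp only [Option.map_some, pvBetter]
          have h2 : ((r + 1 == br + 1) : Bool) = (r == br) := by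
            rcases eq_or_ne r br with h | h
            · subst h; simp
            · rw [beq_eq_false_iff_ne.mpr (by omega), beq_eq_false_iff_ne.mpr h]
          rw [decide_eq_decide.mpr (by omega : (r + 1 < br + 1) ↔ (r < br)), h2]
      rw [hbet]
      by_cases hb : pvBetter r i acc
      · simp only [hb, if_true]
        have := ih (i + 1) (some (r, i)) (fun y hy => h y (by simp [hy]))
        simpa using this
      · simp only [hb, Bool.false_eq_true, if_false]
        exact ih _ _ (fun y hy => h y (by simp [hy]))

-- main per-group lemma: B's single-slot fold selects exactly A's first-hit index
theorem pvG_firstHit (cands low : List String) (i : Nat) :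
    (pvG (fun s => PySem.List.index? cands s) low i none).map (·.2) =
      (pvFirstHit cands low).map (· + i) := by
  induction cands generalizing i with
  | nil =>
    rw [pvG_none]
    · rfl
    · intro x _; simp [PySem.List.index?]
  | cons c rest ih =>
    by_cases hc : c ∈ low
    · -- the head candidate occurs: result is (0, i + first index of c)
      obtain ⟨k, hk⟩ : ∃ k, PySem.List.index? low c = some k := by
        have := PySem.List.index?_isSome_iff (xs := low) (v := c)
        rcases h : PySem.List.index? low c with _ | k
        · rw [h] at this; simp at this; exact absurd hc (by simpa using this)
        · exact ⟨k, rfl⟩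
      have key : ∀ (low' : List String) (i k : Nat),
          PySem.List.index? low' c = some k →
          pvG (fun s => PySem.List.index? (c :: rest) s) low' i none = some (0, k + i) := by
        intro low' 
        induction low' with
        | nil => intro i k h; simp [PySem.List.index?] at h
        | cons x xs ihx =>
          intro i k h
          by_cases hx : x = c
          · subst hx
            rw [PySem.List.index?_cons_self] at h
            injection h with hk0
            subst hk0
            simp only [pvG, PySem.List.index?_cons_self]
            have : pvBetter 0 i none = true := rfl
            simp only [this, if_true]
            simpa using pvG_zero_absorb _ xs (i + 1) i (Nat.lt_succ_self i)
          · rw [PySem.List.index?_cons_of_ne _ hx] at h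
            rcases hxs : PySem.List.index? xs c with _ | k'
            · rw [hxs] at h; simp at h
            · rw [hxs] at h; simp at h
              simp only [pvG]
              have hx' : PySem.List.index? (c :: rest) x = (PySem.List.index? rest x).map (· + 1) :=
                PySem.List.index?_cons_of_ne _ (fun he => hx he.symm)
              rw [hx']
              rcases hrx : PySem.List.index? rest x with _ | r
              · simp only [Option.map_none]
                rw [ihx (i + 1) k' hxs, show k' + (i + 1) = k + i by omega]
              · simp only [Option.map_some]
                have : pvBetter (r + 1) i none = true := rfl
                simp only [this, if_true]
                rw [pvG_acc, ihx (i + 1) k' hxs]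
                simp only [pvComb, pvBetter]
                have : ((0 : Nat) < r + 1 || ((0 : Nat) == r + 1 && k' + (i + 1) < i)) = true := by
                  simp
                rw [if_pos this, show k' + (i + 1) = k + i by omega]
      rw [key low i k hk]
      simp only [pvFirstHit, List.contains_iff_mem.mpr hc, if_true, hk]
      simp [Nat.add_comm]
    · -- head candidate absent: shift ranks, recurse
      have hsh : pvG (fun s => PySem.List.index? (c :: rest) s) low i none =
          (pvG (fun s => PySem.List.index? rest s) low i none).map (fun p => (p.1 + 1, p.2)) := by
        have := pvG_shift (fun s => PySem.List.index? rest s)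
          (fun s => PySem.List.index? (c :: rest) s) low i none
          (fun x hx => PySem.List.index?_cons_of_ne _ (fun he => hc (he ▸ hx)))
        simpa using this
      rw [hsh]
      have : ((pvG (fun s => PySem.List.index? rest s) low i none).map
          (fun p => (p.1 + 1, p.2))).map (·.2) =
          (pvG (fun s => PySem.List.index? rest s) low i none).map (·.2) := by
        rcases pvG (fun s => PySem.List.index? rest s) low i none with _ | p <;> rfl
      rw [this, ih]
      simp [pvFirstHit, hc]

-- the table encodes, for each group, exactly the rank within that group's candidate list
theorem pvRank_eq (s : String) :
    pvRank 0 s = PySem.List.index? (pvCands[0]!) s ∧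
    pvRank 1 s = PySem.List.index? (pvCands[1]!) s ∧
    pvRank 2 s = PySem.List.index? (pvCands[2]!) s ∧
    pvRank 3 s = PySem.List.index? (pvCands[3]!) s := by
  by_cases h1 : s = "time"; · subst h1; decide
  by_cases h2 : s = "t"; · subst h2; decide
  by_cases h3 : s = "age"; · subst h3; decide
  by_cases h4 : s = "date"; · subst h4; decide
  by_cases h5 : s = "year"; · subst h5; decide
  by_cases h6 : s = "age [ka]"; · subst h6; decide
  by_cases h7 : s = "age [ka bp]"; · subst h7; decide
  by_cases h8 : s = "depth"; · subst h8; decide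
  by_cases h9 : s = "z"; · subst h9; decide
  by_cases h10 : s = "z_t"; · subst h10; decide
  by_cases h11 : s = "level"; · subst h11; decide
  by_cases h12 : s = "nlevel"; · subst h12; decide
  by_cases h13 : s = "lvl"; · subst h13; decide
  by_cases h14 : s = "lev"; · subst h14; decide
  by_cases h15 : s = "depth_1"; · subst h15; decide
  by_cases h16 : s = "elevation [m]"; · subst h16; decide
  by_cases h17 : s = "zt"; · subst h17; decide
  by_cases h18 : s = "depth_surface"; · subst h18; decide
  by_cases h19 : s = "zt_moc"; · subst h19; decide
  by_cases h20 : s = "lat"; · subst h20; decide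
  by_cases h21 : s = "latitude"; · subst h21; decide
  by_cases h22 : s = "y"; · subst h22; decide
  by_cases h23 : s = "lat_moc"; · subst h23; decide
  by_cases h24 : s = "lat_psi"; · subst h24; decide
  by_cases h25 : s = "lon"; · subst h25; decide
  by_cases h26 : s = "longitude"; · subst h26; decide
  by_cases h27 : s = "x"; · subst h27; decide
  by_cases h28 : s = "lon_psi"; · subst h28; decide
  have htab : pvKeyTable.get? s = none := by
    simp only [pvKeyTable, PySem.Dict.get?_mk_cons, beq_iff_eq]
    simp [Ne.symm h1, Ne.symm h2, Ne.symm h3, Ne.symm h4, Ne.symm h5, Ne.symm h6, Ne.symm h7,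
      Ne.symm h8, Ne.symm h9, Ne.symm h10, Ne.symm h11, Ne.symm h12, Ne.symm h13, Ne.symm h14,
      Ne.symm h15, Ne.symm h16, Ne.symm h17, Ne.symm h18, Ne.symm h19, Ne.symm h20, Ne.symm h21,
      Ne.symm h22, Ne.symm h23, Ne.symm h24, Ne.symm h25, Ne.symm h26, Ne.symm h27, Ne.symm h28,
      PySem.Dict.get?]
  refine ⟨?_, ?_, ?_, ?_⟩ <;>
  · simp only [pvRank, htab, pvCands, List.getElem!_cons_zero, List.getElem!_cons_succ]
    symm
    rw [PySem.List.index?_eq_none_iff]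
    simp [h1, h2, h3, h4, h5, h6, h7, h8, h9, h10, h11, h12, h13, h14,
      h15, h16, h17, h18, h19, h20, h21, h22, h23, h24, h25, h26, h27, h28]

theorem pvSlot (input : List String) (g : Nat) (cg : List String) (hg : pvCands[g]! = cg)
    (hr : ∀ s, pvRank g s = PySem.List.index? cg s) :
    ((pvLoopB input 0 PySem.Dict.empty).get? g).map (fun p => ((p.2 : Nat) : Int)) =
      (pvFirstHit cg (input.map PySem.Str.lower)).map (fun k => ((k : Nat) : Int)) := by
  rw [pvLoopB_get?]
  rw [PySem.Dict.get?_empty]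
  have : (fun x => pvRank g (PySem.Str.lower x)) =
      (fun x => PySem.List.index? cg (PySem.Str.lower x)) := by
    funext x; exact hr _
  rw [this]
  rw [pvG_comp (fun s => PySem.List.index? cg s) PySem.Str.lower input 0 none]
  have hfh := pvG_firstHit cg (input.map PySem.Str.lower) 0
  rcases hG : pvG (fun s => PySem.List.index? cg s) (input.map PySem.Str.lower) 0 none with _ | p <;>
    rw [hG] at hfh <;>
    rcases hF : pvFirstHit cg (input.map PySem.Str.lower) with _ | k <;>
    rw [hF] at hfh <;> simp_all

-- ===== VERDICT (by name: the statement is the Claim_ definition above) =====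
theorem dim_order_spec : Claim_equal_dim_order := by
  intro input _
  unfold Spec_dim_order dim_order dim_order_alt
  have h0 := pvSlot input 0 (pvCands[0]!) rfl (fun s => (pvRank_eq s).1)
  have h1 := pvSlot input 1 (pvCands[1]!) rfl (fun s => (pvRank_eq s).2.1)
  have h2 := pvSlot input 2 (pvCands[2]!) rfl (fun s => (pvRank_eq s).2.2.1)
  have h3 := pvSlot input 3 (pvCands[3]!) rfl (fun s => (pvRank_eq s).2.2.2)
  simp only [pvCands] at h0 h1 h2 h3 ⊢
  simp only [List.getElem!_cons_zero, List.getElem!_cons_succ] at h0 h1 h2 h3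
  simp only [List.foldl, show List.range 4 = [0, 1, 2, 3] from rfl, List.filterMap]
  rcases e0 : (pvLoopB input 0 PySem.Dict.empty).get? 0 with _ | p0 <;> rw [e0] at h0 <;>
  rcases e1 : (pvLoopB input 0 PySem.Dict.empty).get? 1 with _ | p1 <;> rw [e1] at h1 <;>
  rcases e2 : (pvLoopB input 0 PySem.Dict.empty).get? 2 with _ | p2 <;> rw [e2] at h2 <;>
  rcases e3 : (pvLoopB input 0 PySem.Dict.empty).get? 3 with _ | p3 <;> rw [e3] at h3 <;>
    simp_all
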